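-- pv_equiv track=rewrite | github.com/sohams-MASS/X-CAVATE | xcavate/core/multi_ctr.py | build_pass_robot_map
-- ===== SOURCE A (Python) =====
-- from typing import Dict, List, Optional, Set, Tuple
--
-- def build_pass_robot_map(
--     per_robot_passes: Dict[int, Dict[int, List[int]]],
-- ) -> Dict[int, int]:
--     """Build a mapping from unified pass index to robot index.
--
--     Returns
--     -------
--     dict[int, int]
--         Maps unified pass_idx -> robot_idx.
--     """
--     pass_robot_map: Dict[int, int] = {}
--     global_idx = 0
--     for robot_idx in sorted(per_robot_passes.keys()):
--         robot_passes = per_robot_passes[robot_idx]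
--         for local_idx in sorted(robot_passes.keys()):
--             pass_robot_map[global_idx] = robot_idx
--             global_idx += 1
--     return pass_robot_map
-- ===== SOURCE B (Python) =====
-- def build_pass_robot_map(per_robot_passes):
--     # Segment-search formulation: each robot (in sorted order) owns a block of
--     # consecutive global indices.  Record the cumulative block ends, then map
--     # each global index independently, by binary search, to the first block
--     # whose end exceeds it.
--     robots = sorted(per_robot_passes)
--     ends = []
--     total = 0
--     for r in robots:
--         total += len(per_robot_passes[r])
--         ends.append(total)
--     out = {}
--     for i in range(total):
--         lo, hi = 0, len(ends)
--         while lo < hi: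
--             mid = (lo + hi) // 2
--             if ends[mid] <= i:
--                 lo = mid + 1
--             else:
--                 hi = mid
--         out[i] = robots[lo]
--     return out
-- ===== Notes on version B (the rewrite author's own statement) =====
-- stated objective: alternative
-- what changed: Replaces A's sequential global counter threaded through nested key-loops by a two-stage segment search: first compute the cumulative block end per sorted robot, then map each global index independently, by binary search on the cumulative ends, to the first block whose end exceeds it.
import Mathlib
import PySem

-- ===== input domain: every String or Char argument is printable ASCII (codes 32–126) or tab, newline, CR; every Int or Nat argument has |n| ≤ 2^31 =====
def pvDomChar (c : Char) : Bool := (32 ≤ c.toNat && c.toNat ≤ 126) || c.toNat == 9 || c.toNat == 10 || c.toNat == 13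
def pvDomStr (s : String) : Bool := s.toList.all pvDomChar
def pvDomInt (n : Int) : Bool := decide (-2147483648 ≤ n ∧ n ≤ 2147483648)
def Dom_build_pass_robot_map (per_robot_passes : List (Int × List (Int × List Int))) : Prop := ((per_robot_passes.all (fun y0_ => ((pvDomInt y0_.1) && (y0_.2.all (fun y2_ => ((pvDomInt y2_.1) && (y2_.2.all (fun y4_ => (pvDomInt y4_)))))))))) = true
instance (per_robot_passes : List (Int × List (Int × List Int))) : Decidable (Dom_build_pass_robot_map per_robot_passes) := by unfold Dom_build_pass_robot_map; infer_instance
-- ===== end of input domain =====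

-- B replaces A's running counter over nested key-loops by a two-stage segment search:
-- cumulative block ends per sorted robot, then each global index is mapped independently
-- to the first block whose end exceeds it (alternative decomposition, same results).


-- ===== PORT A =====
def build_pass_robot_map (per_robot_passes : List (Int × List (Int × List Int))) : List (Int × Int) :=
  ((PySem.List.sorted (per_robot_passes.map Prod.fst) (fun x => x) false).foldl
    (fun (st : PySem.Dict Int Int × Int) robot_idx =>
      let robot_passes := (PySem.Dict.mk per_robot_passes).getD robot_idx []
      (PySem.List.sorted (robot_passes.map Prod.fst) (fun x => x) false).foldl
        (fun (st : PySem.Dict Int Int × Int) _local_idx =>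
          (st.1.insert st.2 robot_idx, st.2 + 1)) st)
    (PySem.Dict.empty, 0)).1.items

-- ===== PORT B =====
-- the 'while lo < hi' binary-search loop of Source B; fuel = ends.length bounds the iterations
-- (hi - lo shrinks every step; the none branch is Python's IndexError, unreachable: mid < hi ≤ len(ends))
def pvBis (ends : List Int) (i : Int) (lo hi : Nat) (fuel : Nat) : Nat :=
  match fuel with
  | 0 => lo
  | fuel + 1 =>
    if lo < hi then
      let mid := (lo + hi) / 2
      match ends[mid]? with
      | some v => if v ≤ i then pvBis ends i (mid + 1) hi fuel else pvBis ends i lo mid fuel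
      | none => lo
    else lo

def build_pass_robot_map_alt (per_robot_passes : List (Int × List (Int × List Int))) : List (Int × Int) :=
  let robots := PySem.List.sorted (per_robot_passes.map Prod.fst) (fun x => x) false
  let st := robots.foldl
    (fun (st : List Int × Int) r =>
      let total := st.2 + (((PySem.Dict.mk per_robot_passes).getD r []).length : Int)
      (st.1 ++ [total], total)) ([], 0)
  ((PySem.List.pyRange 0 st.2 1).foldl
    (fun (out : PySem.Dict Int Int) i =>
      out.insert i ((PySem.List.pyGet? robots ((pvBis st.1 i 0 st.1.length st.1.length : Nat) : Int)).getD 0))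
    PySem.Dict.empty).items

-- ===== PRECONDITION & SPEC =====
def Spec_build_pass_robot_map (per_robot_passes : List (Int × List (Int × List Int))) (out : List (Int × Int)) : Prop := out = build_pass_robot_map_alt per_robot_passes
instance (per_robot_passes : List (Int × List (Int × List Int))) (out : List (Int × Int)) : Decidable (Spec_build_pass_robot_map per_robot_passes out) := by unfold Spec_build_pass_robot_map; infer_instance

-- ===== CLAIM (what is proved, stated in full; the proofs are below) =====
def Claim_equal_build_pass_robot_map : Prop := ∀ (per_robot_passes : List (Int × List (Int × List Int))), Dom_build_pass_robot_map per_robot_passes → Spec_build_pass_robot_map per_robot_passes (build_pass_robot_map per_robot_passes)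

-- ===== LEMMAS AND PROOFS =====

-- pass count of robot r (as an Int)
def pvCnt (d : List (Int × List (Int × List Int))) (r : Int) : Int :=
  (((PySem.Dict.mk d).getD r []).length : Int)

-- cumulative block ends of the robot list rs starting from running total t
def pvEnds (d : List (Int × List (Int × List Int))) : List Int → Int → List Int
  | [], _ => []
  | r :: rs, t => (t + pvCnt d r) :: pvEnds d rs (t + pvCnt d r)

-- the flattened robot-per-pass list (A's value list)
def pvFlat (d : List (Int × List (Int × List Int))) (rs : List Int) : List Int :=
  rs.flatMap (fun r => ((PySem.Dict.mk d).getD r []).map (fun _ => r))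

def pvSum (d : List (Int × List (Int × List Int))) (rs : List Int) : Int :=
  (rs.map (pvCnt d)).sum

theorem pvCnt_nonneg (d : List (Int × List (Int × List Int))) (r : Int) : 0 ≤ pvCnt d r := by
  simp [pvCnt]

theorem pvFlat_length (d : List (Int × List (Int × List Int))) (rs : List Int) :
    ((pvFlat d rs).length : Int) = pvSum d rs := by
  induction rs with
  | nil => simp [pvFlat, pvSum]
  | cons r rs ih =>
    simp only [pvFlat, pvSum, List.flatMap_cons, List.length_append, List.length_map,
      List.map_cons, List.sum_cons, pvCnt] at *
    push_cast
    omega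

-- ---- A side: previous-style characterisation as enumerate of the flattened list ----

theorem pv_inner_loop (xs : List Int) (r : Int) (l : List Int) :
    xs.foldl (fun (st : PySem.Dict Int Int × Int) _ => (st.1.insert st.2 r, st.2 + 1))
      (PySem.Dict.mk (PySem.List.enumerate l 0), (l.length : Int))
    = (PySem.Dict.mk (PySem.List.enumerate (l ++ List.replicate xs.length r) 0),
       ((l ++ List.replicate xs.length r).length : Int)) := by
  induction xs generalizing l with
  | nil => simp
  | cons x xs ih =>
    simp only [List.foldl_cons]
    have hfresh : (PySem.Dict.mk (PySem.List.enumerate l 0)).contains (l.length : Int) = false := by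
      rw [PySem.Dict.contains_eq_decide_mem_keys]
      simp only [PySem.Dict.keys_mk, PySem.List.map_fst_enumerate, decide_eq_false_iff_not]
      rw [PySem.List.mem_pyRange_one]
      omega
    have hins : (PySem.Dict.mk (PySem.List.enumerate l 0)).insert (l.length : Int) r
        = PySem.Dict.mk (PySem.List.enumerate (l ++ [r]) 0) := by
      apply PySem.Dict.ext
      rw [PySem.Dict.items_insert, hfresh]
      simp [PySem.List.enumerate_append]
    rw [hins]
    have h2 : ((l.length : Int) + 1) = (((l ++ [r]).length : Nat) : Int) := by
      simp
    rw [h2, ih (l ++ [r]), List.append_assoc]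
    simp [List.replicate_succ]

theorem pv_outer_loop (d : List (Int × List (Int × List Int))) (ks : List Int) (l : List Int) :
    (ks.foldl
      (fun (st : PySem.Dict Int Int × Int) robot_idx =>
        let robot_passes := (PySem.Dict.mk d).getD robot_idx []
        (PySem.List.sorted (robot_passes.map Prod.fst) (fun x => x) false).foldl
          (fun (st : PySem.Dict Int Int × Int) _ => (st.1.insert st.2 robot_idx, st.2 + 1)) st)
      (PySem.Dict.mk (PySem.List.enumerate l 0), (l.length : Int)))
    = (PySem.Dict.mk (PySem.List.enumerate (l ++ pvFlat d ks) 0),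
       ((l ++ pvFlat d ks).length : Int)) := by
  induction ks generalizing l with
  | nil => simp [pvFlat]
  | cons k ks ih =>
    simp only [List.foldl_cons]
    rw [pv_inner_loop, ih]
    have hrep : List.replicate (PySem.List.sorted (((PySem.Dict.mk d).getD k []).map Prod.fst) (fun x => x) false).length k
        = ((PySem.Dict.mk d).getD k []).map (fun _ => k) := by
      rw [PySem.List.length_sorted, List.length_map, ← List.map_const']
    simp only [pvFlat, List.flatMap_cons] at *
    rw [hrep]
    simp [List.append_assoc]

-- ---- B side ----

-- the first stage of B: foldl building the cumulative ends list
theorem pv_ends_loop (d : List (Int × List (Int × List Int))) (rs : List Int) (l : List Int) (t : Int) :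
    rs.foldl
      (fun (st : List Int × Int) r =>
        let total := st.2 + (((PySem.Dict.mk d).getD r []).length : Int)
        (st.1 ++ [total], total)) (l, t)
    = (l ++ pvEnds d rs t, t + pvSum d rs) := by
  induction rs generalizing l t with
  | nil => simp [pvEnds, pvSum]
  | cons r rs ih =>
    simp only [List.foldl_cons, pvEnds, pvSum, List.map_cons, List.sum_cons]
    rw [ih]
    simp only [pvCnt, List.append_assoc, List.cons_append, List.nil_append, Prod.mk.injEq]
    exact ⟨trivial, by simp [pvSum]; ring⟩

-- pvFirst ends i: index of the first end exceeding i (the value bisect_right computes)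
def pvFirst (ends : List Int) (i : Int) : Nat :=
  match ends with
  | [] => 0
  | e :: es => if i < e then 0 else pvFirst es i + 1

theorem pvFirst_le_length (ends : List Int) (i : Int) : pvFirst ends i ≤ ends.length := by
  induction ends with
  | nil => simp [pvFirst]
  | cons e es ih =>
    simp only [pvFirst, List.length_cons]
    split <;> omega

theorem pvFirst_below (ends : List Int) (i : Int) (m : Nat) (hm : m < ends.length)
    (h : m < pvFirst ends i) : ends[m] ≤ i := by
  induction ends generalizing m with
  | nil => simp at hm
  | cons e es ih =>
    simp only [pvFirst] at h
    by_cases he : i < e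
    · simp [he] at h
    · rw [if_neg he] at h
      cases m with
      | zero => simpa using le_of_not_gt he
      | succ m =>
        simp only [List.getElem_cons_succ]
        exact ih m (by simpa using hm) (by omega)

theorem pvFirst_above (ends : List Int) (i : Int) (hs : ends.Pairwise (· ≤ ·)) (m : Nat)
    (hm : m < ends.length) (h : pvFirst ends i ≤ m) : i < ends[m] := by
  induction ends generalizing m with
  | nil => simp at hm
  | cons e es ih =>
    simp only [pvFirst] at h
    rw [List.pairwise_cons] at hs
    by_cases he : i < e
    · cases m with
      | zero => simpa using he
      | succ m =>
        have hm' : m < es.length := by simpa using hm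
        have : e ≤ es[m] := hs.1 _ (List.getElem_mem hm')
        simp only [List.getElem_cons_succ]
        omega
    · rw [if_neg he] at h
      cases m with
      | zero => omega
      | succ m =>
        simp only [List.getElem_cons_succ]
        exact ih hs.2 m (by simpa using hm) (by omega)

-- at lo = hi the bisection interval is empty and lo is bisect_right's answer
theorem pv_bis_done (ends : List Int) (i : Int) (hs : ends.Pairwise (· ≤ ·)) (lo : Nat)
    (hhi : lo ≤ ends.length)
    (hbelow : ∀ m, (hm : m < ends.length) → m < lo → ends[m] ≤ i)
    (habove : ∀ m, (hm : m < ends.length) → lo ≤ m → i < ends[m]) :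
    lo = pvFirst ends i := by
  rcases Nat.lt_trichotomy lo (pvFirst ends i) with h | h | h
  · have hlen : lo < ends.length := by
      have := pvFirst_le_length ends i; omega
    have h1 := pvFirst_below ends i lo hlen h
    have h2 := habove lo hlen le_rfl
    omega
  · exact h
  · have hlen : pvFirst ends i < ends.length := by omega
    have h1 := hbelow (pvFirst ends i) hlen h
    have h2 := pvFirst_above ends i hs (pvFirst ends i) hlen le_rfl
    omega

-- bisection computes pvFirst on a sorted list
theorem pv_bis_eq (ends : List Int) (i : Int) (hs : ends.Pairwise (· ≤ ·)) :
    ∀ (fuel lo hi : Nat), hi ≤ ends.length → lo ≤ hi → hi - lo ≤ fuel →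
    (∀ m, (hm : m < ends.length) → m < lo → ends[m] ≤ i) →
    (∀ m, (hm : m < ends.length) → hi ≤ m → i < ends[m]) →
    pvBis ends i lo hi fuel = pvFirst ends i := by
  intro fuel
  induction fuel with
  | zero =>
    intro lo hi h1 h2 h3 hbelow habove
    have hlh : lo = hi := by omega
    subst hlh
    exact pv_bis_done ends i hs lo h1 hbelow habove
  | succ fuel ih =>
    intro lo hi h1 h2 h3 hbelow habove
    simp only [pvBis]
    by_cases hlt : lo < hi
    · rw [if_pos hlt]
      have hmidlt : (lo + hi) / 2 < ends.length := by omega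
      rw [List.getElem?_eq_getElem hmidlt]
      dsimp only
      by_cases hv : ends[(lo + hi) / 2] ≤ i
      · rw [if_pos hv]
        apply ih ((lo + hi) / 2 + 1) hi h1 (by omega) (by omega)
        · intro m hm hmlt
          by_cases hmlo : m < lo
          · exact hbelow m hm hmlo
          · by_cases hmeq : m = (lo + hi) / 2
            · subst hmeq; exact hv
            · have : ends[m] ≤ ends[(lo + hi) / 2] :=
                List.pairwise_iff_getElem.mp hs m ((lo + hi) / 2) hm hmidlt (by omega)
              omega
        · exact habove
      · rw [if_neg hv]
        apply ih lo ((lo + hi) / 2) (by omega) (by omega) (by omega) hbelow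
        intro m hm hmge
        by_cases hmeq : m = (lo + hi) / 2
        · subst hmeq; omega
        · have : ends[(lo + hi) / 2] ≤ ends[m] :=
            List.pairwise_iff_getElem.mp hs ((lo + hi) / 2) m hmidlt hm (by omega)
          omega
    · rw [if_neg hlt]
      have hlh : lo = hi := by omega
      subst hlh
      exact pv_bis_done ends i hs lo h1 hbelow habove

-- every cumulative end is at least the starting total
theorem pv_ends_ge (d : List (Int × List (Int × List Int))) (rs : List Int) (t : Int)
    (x : Int) (hx : x ∈ pvEnds d rs t) : t ≤ x := by
  induction rs generalizing t with
  | nil => simp [pvEnds] at hx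
  | cons r rs ih =>
    have hc := pvCnt_nonneg d r
    simp only [pvEnds, List.mem_cons] at hx
    rcases hx with h | h
    · omega
    · have := ih (t + pvCnt d r) h
      omega

-- the cumulative ends are nondecreasing
theorem pv_ends_sorted (d : List (Int × List (Int × List Int))) (rs : List Int) (t : Int) :
    (pvEnds d rs t).Pairwise (· ≤ ·) := by
  induction rs generalizing t with
  | nil => simp [pvEnds]
  | cons r rs ih =>
    simp only [pvEnds, List.pairwise_cons]
    exact ⟨fun x hx => pv_ends_ge d rs (t + pvCnt d r) x hx, ih (t + pvCnt d r)⟩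

-- the segment search (via pvFirst) returns the flattened list's element
theorem pv_main (d : List (Int × List (Int × List Int))) (rs : List Int) (t i : Int)
    (h1 : t ≤ i) (h2 : i < t + pvSum d rs) :
    (PySem.List.pyGet? rs ((pvFirst (pvEnds d rs t) i : Nat) : Int)).getD 0
    = PySem.List.pyGetD (pvFlat d rs) (i - t) 0 := by
  induction rs generalizing t with
  | nil =>
    simp only [pvSum, List.map_nil, List.sum_nil] at h2
    omega
  | cons r rs ih =>
    have hc := pvCnt_nonneg d r
    simp only [pvEnds, pvFirst]
    by_cases hlt : i < t + pvCnt d r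
    · -- stays in the first block
      rw [if_pos hlt]
      have hl : PySem.List.pyGet? (r :: rs) ((0 : Nat) : Int) = some r := by
        simp
      rw [hl]
      have h0 : 0 ≤ i - t := by omega
      have hltlen : (i - t).toNat < (((PySem.Dict.mk d).getD r []).map (fun _ => r)).length := by
        simp only [List.length_map]; simp only [pvCnt] at hlt; omega
      simp only [pvFlat, List.flatMap_cons, Option.getD_some]
      rw [PySem.List.pyGetD_of_nonneg _ _ h0, List.getD_eq_getElem?_getD,
        List.getElem?_append_left hltlen, List.getElem?_eq_getElem hltlen]
      simp
    · -- moves on to the rest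
      rw [if_neg hlt]
      have hle : t + pvCnt d r ≤ i := by omega
      have hrec := ih (t + pvCnt d r) hle (by
        simp only [pvSum, List.map_cons, List.sum_cons] at h2
        simp only [pvSum]; omega)
      have hcast : (((pvFirst (pvEnds d rs (t + pvCnt d r)) i + 1 : Nat)) : Int)
          = ((pvFirst (pvEnds d rs (t + pvCnt d r)) i : Nat) : Int) + 1 := by
        push_cast; ring
      rw [hcast, PySem.List.pyGet?_cons_succ, hrec]
      -- now reduce the flattened list on the right
      have hlen : (((PySem.Dict.mk d).getD r []).map (fun _ => r)).length = (pvCnt d r).toNat := by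
        simp [pvCnt]
      have hge : (((PySem.Dict.mk d).getD r []).map (fun _ => r)).length ≤ (i - t).toNat := by
        rw [hlen]; omega
      conv_rhs => rw [pvFlat, List.flatMap_cons]
      rw [PySem.List.pyGetD_of_nonneg _ _ (by omega : (0:Int) ≤ i - (t + pvCnt d r)),
          PySem.List.pyGetD_of_nonneg _ _ (by omega : (0:Int) ≤ i - t),
          List.getD_eq_getElem?_getD, List.getD_eq_getElem?_getD,
          List.getElem?_append_right hge]
      congr 2
      rw [hlen]
      omega

-- the second stage of B: the dict built over range(total) has items map (i, f i)
theorem pv_fill_loop (f : Int → Int) (n : Nat) :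
    ((PySem.List.pyRange 0 (n : Int) 1).foldl
      (fun (out : PySem.Dict Int Int) i => out.insert i (f i)) PySem.Dict.empty)
    = PySem.Dict.mk ((PySem.List.pyRange 0 (n : Int) 1).map (fun i => (i, f i))) := by
  induction n with
  | zero =>
    have h : PySem.List.pyRange 0 ((0 : Nat) : Int) 1 = [] :=
      PySem.List.pyRange_one_eq_nil (by simp)
    rw [h]
    rfl
  | succ n ih =>
    have hsplit : PySem.List.pyRange 0 ((n + 1 : Nat) : Int) 1
        = PySem.List.pyRange 0 (n : Int) 1 ++ [(n : Int)] := by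
      have : ((n + 1 : Nat) : Int) = (n : Int) + 1 := by push_cast; ring
      rw [this, PySem.List.pyRange_one_succ_right (by positivity)]
    rw [hsplit]
    simp only [List.foldl_append, List.foldl_cons, List.foldl_nil, ih, List.map_append,
      List.map_cons, List.map_nil]
    apply PySem.Dict.ext
    have hfresh : (PySem.Dict.mk ((PySem.List.pyRange 0 (n : Int) 1).map (fun i => (i, f i)))).contains (n : Int) = false := by
      rw [PySem.Dict.contains_eq_decide_mem_keys]
      simp only [PySem.Dict.keys_mk, List.map_map, decide_eq_false_iff_not]
      intro hmem
      obtain ⟨x, hx, hx2⟩ := List.mem_map.mp hmem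
      rw [PySem.List.mem_pyRange_one] at hx
      simp only [Function.comp_apply] at hx2
      omega
    rw [PySem.Dict.items_insert, hfresh]
    simp

-- ===== VERDICT (by name: the statement is the Claim_ definition above) =====
theorem build_pass_robot_map_spec : Claim_equal_build_pass_robot_map := by
  intro d _
  show build_pass_robot_map d = build_pass_robot_map_alt d
  unfold build_pass_robot_map build_pass_robot_map_alt
  dsimp only
  set robots := PySem.List.sorted (d.map Prod.fst) (fun x => x) false with hrobots
  -- B's first stage
  rw [pv_ends_loop d robots [] 0]
  simp only [List.nil_append, zero_add]
  -- A's loops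
  have hA0 : (PySem.Dict.empty : PySem.Dict Int Int)
      = PySem.Dict.mk (PySem.List.enumerate ([] : List Int) 0) := rfl
  conv_lhs => rw [hA0]
  have hA := pv_outer_loop d robots []
  simp only [List.length_nil, Nat.cast_zero] at hA
  rw [hA]
  simp only [List.nil_append]
  -- B's second stage
  have htot : pvSum d robots = (((pvFlat d robots).length : Nat) : Int) := (pvFlat_length d robots).symm
  rw [htot, pv_fill_loop]
  -- compare item lists
  have hcongr : ∀ i ∈ PySem.List.pyRange 0 (((pvFlat d robots).length : Nat) : Int) 1,
      ((i, (PySem.List.pyGet? robots ((pvBis (pvEnds d robots 0) i 0 (pvEnds d robots 0).length (pvEnds d robots 0).length : Nat) : Int)).getD 0) : Int × Int)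
      = (i, PySem.List.pyGetD (pvFlat d robots) i 0) := by
    intro i hi
    rw [PySem.List.mem_pyRange_one] at hi
    rw [pv_bis_eq (pvEnds d robots 0) i (pv_ends_sorted d robots 0)
      (pvEnds d robots 0).length 0 (pvEnds d robots 0).length le_rfl (Nat.zero_le _)
      (by omega) (fun m hm hm0 => absurd hm0 (by omega))
      (fun m hm hmge => absurd hm (by omega))]
    have := pv_main d robots 0 i hi.1 (by rw [htot]; omega)
    simp only [sub_zero] at this
    rw [this]
  show PySem.List.enumerate (pvFlat d robots) 0 = List.map _ _
  rw [List.map_congr_left hcongr, PySem.List.enumerate_eq_map_pyRange (pvFlat d robots) 0]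
  simp
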